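-- pv_equiv track=rewrite | github.com/Apress/Generative-Artificial-Intelligence | Chapter-9/rag_dash_app.py | extract_desired_text
-- ===== SOURCE A (Python) =====
-- def extract_desired_text(input_document, target_keyword):
--     lines = input_document.split('\n')
--     desired_text = ""
--     last_occurrence_index = -1
--
--     for i, line in enumerate(lines):
--         if target_keyword in line:
--             last_occurrence_index = i
--
--     if last_occurrence_index != -1:
--         desired_lines = lines[last_occurrence_index+1:]
--         desired_text = "\n".join(line.strip() for line in desired_lines)
--     else:
--         desired_text = input_document.strip()
--
--     return desired_text
-- ===== SOURCE B (Python) =====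
-- def extract_desired_text(input_document, target_keyword):
--     tail = []
--     for line in reversed(input_document.split('\n')):
--         if target_keyword in line:
--             return "\n".join(l.strip() for l in reversed(tail))
--         tail.append(line)
--     return input_document.strip()
-- ===== Notes on version B (the rewrite author's own statement) =====
-- stated objective: alternative
-- what changed: B scans the lines in reverse with an early break at the first keyword hit (the last occurrence), accumulating the tail as it goes, instead of A's full forward enumerate pass to record the last index followed by a slice.
import Mathlib
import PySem

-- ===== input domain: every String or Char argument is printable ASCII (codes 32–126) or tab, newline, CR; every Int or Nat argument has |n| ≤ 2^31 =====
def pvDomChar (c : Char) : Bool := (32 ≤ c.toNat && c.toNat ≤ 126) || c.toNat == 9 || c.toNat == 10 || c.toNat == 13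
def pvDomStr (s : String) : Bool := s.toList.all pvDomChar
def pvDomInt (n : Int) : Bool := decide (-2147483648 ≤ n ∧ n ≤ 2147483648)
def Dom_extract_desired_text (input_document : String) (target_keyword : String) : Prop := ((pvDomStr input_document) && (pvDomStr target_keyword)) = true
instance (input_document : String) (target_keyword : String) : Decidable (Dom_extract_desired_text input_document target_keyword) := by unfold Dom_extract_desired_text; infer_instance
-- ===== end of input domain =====

-- B scans the split lines in reverse with an early break at the last keyword occurrence,
-- accumulating the tail, instead of A's forward enumerate pass recording the last index plus a slice.


-- ===== PORT A =====
def extract_desired_text (input_document : String) (target_keyword : String) : String :=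
  let lines := (PySem.Str.split? input_document "\n").getD []
  let last_occurrence_index : Int :=
    (PySem.List.enumerate lines 0).foldl
      (fun acc li => if PySem.Str.isIn target_keyword li.2 then li.1 else acc) (-1)
  if last_occurrence_index ≠ -1 then
    let desired_lines := PySem.List.slice lines (some (last_occurrence_index + 1)) none
    PySem.Str.join "\n" (desired_lines.map PySem.Str.strip)
  else
    PySem.Str.strip input_document

-- ===== PORT B =====
-- reverse scan with early break: returns some(result) on the first keyword hit, none if never found
def edtGo (kw : String) : List String → List String → Option String
  | [], _ => none
  | l :: rest, tail =>
    if PySem.Str.isIn kw l then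
      some (PySem.Str.join "\n" (tail.reverse.map PySem.Str.strip))
    else edtGo kw rest (tail ++ [l])

def extract_desired_text_alt (input_document : String) (target_keyword : String) : String :=
  match edtGo target_keyword ((PySem.Str.split? input_document "\n").getD []).reverse [] with
  | some s => s
  | none => PySem.Str.strip input_document

-- ===== PRECONDITION & SPEC =====
def Spec_extract_desired_text (input_document : String) (target_keyword : String) (out : String) : Prop := out = extract_desired_text_alt input_document target_keyword
instance (input_document : String) (target_keyword : String) (out : String) : Decidable (Spec_extract_desired_text input_document target_keyword out) := by unfold Spec_extract_desired_text; infer_instance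

-- ===== CLAIM (what is proved, stated in full; the proofs are below) =====
def Claim_equal_extract_desired_text : Prop := ∀ (input_document : String) (target_keyword : String), Dom_extract_desired_text input_document target_keyword → Spec_extract_desired_text input_document target_keyword (extract_desired_text input_document target_keyword)

-- ===== LEMMAS AND PROOFS =====

-- A's foldl over an enumerate of keyword-free lines leaves the accumulator unchanged
theorem edt_foldl_none (kw : String) (xs : List String) (s acc : Int)
    (h : ∀ l ∈ xs, PySem.Str.isIn kw l = false) :
    (PySem.List.enumerate xs s).foldl
      (fun acc li => if PySem.Str.isIn kw li.2 then li.1 else acc) acc = acc := by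
  induction xs generalizing s acc with
  | nil => simp [PySem.List.enumerate_nil]
  | cons x xs ih =>
    rw [PySem.List.enumerate_cons, List.foldl_cons]
    simp only [h x (by simp), Bool.false_eq_true, if_false]
    exact ih (s + 1) acc (fun l hl => h l (by simp [hl]))

-- A's foldl computes the index of the last keyword line
theorem edt_foldl_last (kw : String) (pre post : List String) (hit : String) (s acc : Int)
    (hhit : PySem.Str.isIn kw hit = true)
    (hpost : ∀ l ∈ post, PySem.Str.isIn kw l = false) :
    (PySem.List.enumerate (pre ++ hit :: post) s).foldl
      (fun acc li => if PySem.Str.isIn kw li.2 then li.1 else acc) acc = s + pre.length := by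
  rw [PySem.List.enumerate_append, List.foldl_append, PySem.List.enumerate_cons,
    List.foldl_cons]
  simp only [hhit, if_true]
  exact edt_foldl_none kw post (s + pre.length + 1) (s + pre.length) hpost

-- B's reverse scan never fires on keyword-free lines
theorem edtGo_none (kw : String) (xs tail : List String)
    (h : ∀ l ∈ xs, PySem.Str.isIn kw l = false) :
    edtGo kw xs tail = none := by
  induction xs generalizing tail with
  | nil => rfl
  | cons x xs ih =>
    simp only [edtGo, h x (by simp), Bool.false_eq_true, if_false]
    exact ih (tail ++ [x]) (fun l hl => h l (by simp [hl]))

-- B's reverse scan fires at the first hit, having accumulated exactly the lines before it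
theorem edtGo_hit (kw : String) (xs : List String) (hit : String) (ys tail : List String)
    (hxs : ∀ l ∈ xs, PySem.Str.isIn kw l = false)
    (hhit : PySem.Str.isIn kw hit = true) :
    edtGo kw (xs ++ hit :: ys) tail =
      some (PySem.Str.join "\n" ((tail ++ xs).reverse.map PySem.Str.strip)) := by
  induction xs generalizing tail with
  | nil =>
    have hhit' : PySem.Chars.isIn kw.toList hit.toList = true := by simpa using hhit
    simp [edtGo, hhit']
  | cons x xs ih =>
    have hx : PySem.Chars.isIn kw.toList x.toList = false := by
      simpa using hxs x (by simp)
    have := ih (tail ++ [x]) (fun l hl => hxs l (by simp [hl]))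
    simpa [edtGo, hx, List.append_assoc] using this

-- every list is keyword-free, or splits as pre ++ hit :: post with a keyword-free post
theorem edt_decomp (kw : String) (lines : List String) :
    (∀ l ∈ lines, PySem.Str.isIn kw l = false) ∨
    ∃ pre hit post, lines = pre ++ hit :: post ∧ PySem.Str.isIn kw hit = true ∧
      ∀ l ∈ post, PySem.Str.isIn kw l = false := by
  induction lines with
  | nil => exact Or.inl (by simp)
  | cons x xs ih =>
    rcases ih with h | ⟨pre, hit, post, heq, hhit, hpost⟩
    · by_cases hx : PySem.Str.isIn kw x = true
      · exact Or.inr ⟨[], x, xs, by simp, hx, h⟩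
      · exact Or.inl (by
          intro l hl
          rcases List.mem_cons.mp hl with rfl | hl
          · simpa using hx
          · exact h l hl)
    · exact Or.inr ⟨x :: pre, hit, post, by simp [heq], hhit, hpost⟩

theorem edt_core (input_document : String) (target_keyword : String)
    (lines : List String) :
    (let last_occurrence_index : Int :=
      (PySem.List.enumerate lines 0).foldl
        (fun acc li => if PySem.Str.isIn target_keyword li.2 then li.1 else acc) (-1)
     if last_occurrence_index ≠ -1 then
       PySem.Str.join "\n"
         ((PySem.List.slice lines (some (last_occurrence_index + 1)) none).map PySem.Str.strip)
     else PySem.Str.strip input_document) =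
      (match edtGo target_keyword lines.reverse [] with
       | some s => s
       | none => PySem.Str.strip input_document) := by
  rcases edt_decomp target_keyword lines with h | ⟨pre, hit, post, heq, hhit, hpost⟩
  · rw [edt_foldl_none target_keyword lines 0 (-1) h,
      edtGo_none target_keyword lines.reverse []
        (fun l hl => h l (List.mem_reverse.mp hl))]
    simp
  · have hA := edt_foldl_last target_keyword pre post hit 0 (-1) hhit hpost
    subst heq
    rw [hA]
    have hrev : (pre ++ hit :: post).reverse = post.reverse ++ hit :: pre.reverse := by
      simp
    rw [hrev, edtGo_hit target_keyword post.reverse hit pre.reverse []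
      (fun l hl => hpost l (List.mem_reverse.mp hl)) hhit]
    have hne : (0 : Int) + (pre.length : Int) ≠ -1 := by omega
    simp only [zero_add, List.nil_append, List.reverse_reverse]
    have hsl : PySem.List.slice (pre ++ hit :: post) (some ((pre.length : Int) + 1)) none
        = post := by
      have : ((pre.length : Int) + 1) = ((pre.length + 1 : Nat) : Int) := by push_cast; ring
      rw [this, PySem.List.slice_from_natCast]
      have : pre ++ hit :: post = (pre ++ [hit]) ++ post := by simp
      rw [this]
      have hlen : pre.length + 1 = (pre ++ [hit]).length := by simp
      rw [hlen, List.drop_left]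
    rw [hsl, if_pos (show ((pre.length : Nat) : Int) ≠ -1 by omega)]

-- ===== VERDICT (by name: the statement is the Claim_ definition above) =====
theorem extract_desired_text_spec : Claim_equal_extract_desired_text := by
  intro input_document target_keyword _
  unfold Spec_extract_desired_text
  exact edt_core input_document target_keyword _
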